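-- pv_equiv track=rewrite | github.com/manuelndeffo/ensae_prog24 | swap_puzzle/solver.py | all_one_swaps_tuple
-- ===== SOURCE A (Python) =====
-- import copy
--
-- def flatten_grid(matrix):
--
--     """
--     Convert a matrix or a list of list into a list.
--
--     Parameters:
--     -----------
--     matrix: list of list
--         the list of list you want to flatten
--
--     Output:
--     -------
--     flat_list: list
--         The corresponding list
--     """
--
--     flat_list = []
--     for row in matrix:
--         flat_list.extend(row)
--     return flat_list
--
-- def swappable(matrix, cell1, cell2):
--
--     """
--     Checks if two cells are swappable.
--
--     Parameters:
--     -----------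
--     matrix: list of list
--         the list of list you want to flatten
--
--     Output:
--     -------
--     A boolean ( True or False)
--     """
--     m = len(matrix)
--     n = len(matrix[0])
--
--     if 0 <= cell1[0] <= m-1  and 0 <= cell2[0] <= m-1 :
--         if 0 <= cell1[1] <= n-1  and 0 <= cell2[1] <= n-1:
--             if (cell1[0] == cell2[0] and abs(cell1[1]-cell2[1]) == 1) or (cell1[1] == cell2[1] and abs(cell1[0]-cell2[0]) == 1):
--                 return True
--     else:
--         return False
--
-- def all_one_swaps_tuple(matrix):
--
--     """
--     Takes  a matrix (ist of list) and give all the possible swaps.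
--
--     Parameters:
--     -----------
--     matrix: list of list
--         the list of list you want to flatten
--
--     Output:
--     -------
--     all_perm: list
--         The corresponding list of all possible state of a list of lists
--     """
--
--     track = set()
--     all_perm = []
--
--     for i in range(len(matrix)):
--         for j in range(len(matrix[0])):
--             for k in [1, -1]:
--                 if swappable(matrix, (i, j), (i+k, j)):
--                     if ((i, j), (i+k, j)) not in track and ((i+k, j), (i, j)) not in track:
--                         track.add(((i, j), (i+k, j)))
--                         temp = copy.deepcopy(matrix)
--                         temp[i+k][j], temp[i][j] = temp[i][j], temp[i+k][j]
--                         all_perm.append(tuple(flatten_grid(temp)))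
--
--                 if swappable(matrix, (i, j), (i, j+k)):
--                     if ((i, j), (i, j+k)) not in track and ((i, j+k),(i, j))not in track:
--                         track.add(((i, j), (i, j+k)))
--                         temp = copy.deepcopy(matrix)
--                         temp[i][j+k], temp[i][j] = temp[i][j], temp[i][j+k]
--                         all_perm.append(tuple(flatten_grid(temp)))
--
--     return all_perm
-- ===== SOURCE B (Python) =====
-- def _flat_swap(flat, p, q):
--     out = list(flat)
--     out[p], out[q] = out[q], out[p]
--     return tuple(out)
--
-- def all_one_swaps_tuple(matrix):
--     # Flatten once; emit each neighbour swap as a copy of the flat list with two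
--     # positions exchanged (positions located via per-row offsets), down then right.
--     flat = []
--     offsets = []
--     for row in matrix:
--         offsets.append(len(flat))
--         flat.extend(row)
--     m = len(matrix)
--     n = len(matrix[0]) if matrix else 0
--     res = []
--     for i in range(m):
--         for j in range(n):
--             if i + 1 < m:
--                 res.append(_flat_swap(flat, offsets[i] + j, offsets[i + 1] + j))
--             if j + 1 < n:
--                 res.append(_flat_swap(flat, offsets[i] + j, offsets[i] + j + 1))
--     return res
-- ===== Notes on version B (the rewrite author's own statement) =====
-- stated objective: alternative
-- what changed: B flattens the grid once with per-row offsets and emits each adjacent swap (down, then right, per cell) as a copy of the flat list with two positions exchanged, dropping A's track set, swappable helper, k in [1,-1] bidirectional scan and per-swap deepcopy+re-flatten.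
import Mathlib
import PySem

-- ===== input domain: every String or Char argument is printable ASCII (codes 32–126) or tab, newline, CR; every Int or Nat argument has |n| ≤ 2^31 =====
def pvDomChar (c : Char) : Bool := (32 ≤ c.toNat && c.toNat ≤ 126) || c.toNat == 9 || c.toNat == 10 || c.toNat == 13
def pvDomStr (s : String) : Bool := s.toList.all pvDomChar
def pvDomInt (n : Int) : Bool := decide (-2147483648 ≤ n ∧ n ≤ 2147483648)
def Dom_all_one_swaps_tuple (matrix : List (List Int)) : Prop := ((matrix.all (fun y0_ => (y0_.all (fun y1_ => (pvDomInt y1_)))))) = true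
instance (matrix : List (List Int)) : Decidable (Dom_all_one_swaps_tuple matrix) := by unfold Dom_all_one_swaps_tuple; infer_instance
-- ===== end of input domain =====

-- B flattens the grid once and emits each swap by exchanging two flat positions
-- (per-row offsets), instead of A's track-set + swappable + k in [1,-1] scan with
-- a deepcopy and re-flatten per swap: an alternative decomposition, same results.

-- ===== PORT A =====

-- flatten_grid: 'for row in matrix: flat_list.extend(row)'
def pvFlatten (matrix : List (List Int)) : List Int :=
  matrix.foldl (fun flat_list row => flat_list ++ row) []

-- swappable: falls through returning None (falsy) on a non-adjacent pair; ported as false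
-- (the caller only tests truthiness). matrix[0] is exact here: the caller never calls it
-- on an empty matrix (pyGet? 0 |>.getD [] is unreached then).
def pvSwappable (matrix : List (List Int)) (c1 c2 : Int × Int) : Bool :=
  let m : Int := matrix.length
  let n : Int := ((PySem.List.pyGet? matrix 0).getD []).length
  if 0 ≤ c1.1 ∧ c1.1 ≤ m - 1 ∧ 0 ≤ c2.1 ∧ c2.1 ≤ m - 1 then
    if 0 ≤ c1.2 ∧ c1.2 ≤ n - 1 ∧ 0 ≤ c2.2 ∧ c2.2 ≤ n - 1 then
      decide ((c1.1 = c2.1 ∧ (c1.2 - c2.2).natAbs = 1) ∨ (c1.2 = c2.2 ∧ (c1.1 - c2.1).natAbs = 1))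
    else false
  else false

-- temp[i][j]: both indexes are guarded in range by swappable + Pre_, so the defaults are unreached
def pvGet (matrix : List (List Int)) (i j : Int) : Int :=
  ((PySem.List.pyGet? ((PySem.List.pyGet? matrix i).getD []) j).getD 0)

-- temp[i][j] = v  (indices guarded in range by swappable + Pre_, where pySetD is exact)
def pvSet (matrix : List (List Int)) (i j : Int) (v : Int) : List (List Int) :=
  PySem.List.pySetD matrix i (PySem.List.pySetD ((PySem.List.pyGet? matrix i).getD []) j v)

-- 'temp[a][b], temp[c][d] = temp[c][d], temp[a][b]': RHS read first, targets assigned left to right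
def pvSwap (matrix : List (List Int)) (a b c d : Int) : List (List Int) :=
  let v1 := pvGet matrix c d
  let v2 := pvGet matrix a b
  pvSet (pvSet matrix a b v1) c d v2

-- the body of 'for k in [1, -1]:'
def pvStepK (matrix : List (List Int)) (i j : Int)
    (st : PySem.Set ((Int × Int) × (Int × Int)) × List (List Int)) (k : Int) :
    PySem.Set ((Int × Int) × (Int × Int)) × List (List Int) :=
  let st :=
    if pvSwappable matrix (i, j) (i + k, j) then
      if !(PySem.Set.contains st.1 ((i, j), (i + k, j))) && !(PySem.Set.contains st.1 ((i + k, j), (i, j))) then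
        (PySem.Set.add st.1 ((i, j), (i + k, j)), st.2 ++ [pvFlatten (pvSwap matrix (i + k) j i j)])
      else st
    else st
  if pvSwappable matrix (i, j) (i, j + k) then
    if !(PySem.Set.contains st.1 ((i, j), (i, j + k))) && !(PySem.Set.contains st.1 ((i, j + k), (i, j))) then
      (PySem.Set.add st.1 ((i, j), (i, j + k)), st.2 ++ [pvFlatten (pvSwap matrix i (j + k) i j)])
    else st
  else st

def pvCellA (matrix : List (List Int)) (i : Int)
    (st : PySem.Set ((Int × Int) × (Int × Int)) × List (List Int)) (j : Int) :
    PySem.Set ((Int × Int) × (Int × Int)) × List (List Int) :=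
  ([(1 : Int), -1]).foldl (pvStepK matrix i j) st

def all_one_swaps_tuple (matrix : List (List Int)) : List (List Int) :=
  ((PySem.List.pyRange 0 (matrix.length : Int) 1).foldl (fun st i =>
      (PySem.List.pyRange 0 (((PySem.List.pyGet? matrix 0).getD []).length : Int) 1).foldl
        (pvCellA matrix i) st)
    ((PySem.Set.empty : PySem.Set ((Int × Int) × (Int × Int))), ([] : List (List Int)))).2

-- ===== PORT B =====

-- out[p], out[q] = out[q], out[p] on a fresh copy of the flat list (p, q in range at every call site)
def pvFlatSwap (flat : List Int) (p q : Nat) : List Int :=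
  (flat.set p (flat.getD q 0)).set q (flat.getD p 0)

def all_one_swaps_tuple_alt (matrix : List (List Int)) : List (List Int) :=
  let fo := matrix.foldl (fun (fo : List Int × List Nat) row => (fo.1 ++ row, fo.2 ++ [fo.1.length])) ([], [])
  let flat := fo.1
  let offsets := fo.2
  let m := matrix.length
  let n := match matrix with | [] => 0 | r :: _ => r.length
  (List.range m).foldl (fun res i =>
    (List.range n).foldl (fun res j =>
      let res := if i + 1 < m then
          res ++ [pvFlatSwap flat (offsets.getD i 0 + j) (offsets.getD (i + 1) 0 + j)] else res
      if j + 1 < n then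
        res ++ [pvFlatSwap flat (offsets.getD i 0 + j) (offsets.getD i 0 + j + 1)] else res) res) []

-- ===== PRECONDITION & SPEC =====

-- Pre_ excludes exactly the inputs where A raises IndexError: some row is shorter than the
-- first row (A indexes every row at columns 0..len(matrix[0])-1).
def Pre_all_one_swaps_tuple (matrix : List (List Int)) : Prop :=
  ∀ r ∈ matrix, (matrix.headD []).length ≤ r.length
instance (matrix : List (List Int)) : Decidable (Pre_all_one_swaps_tuple matrix) := by
  unfold Pre_all_one_swaps_tuple; infer_instance

def pvWitness_all_one_swaps_tuple : List (List Int) := [[1, 2], [3, 4]]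

def Spec_all_one_swaps_tuple (matrix : List (List Int)) (out : List (List Int)) : Prop :=
  out = all_one_swaps_tuple_alt matrix
instance (matrix : List (List Int)) (out : List (List Int)) : Decidable (Spec_all_one_swaps_tuple matrix out) := by
  unfold Spec_all_one_swaps_tuple; infer_instance

-- ===== CLAIM (what is proved, stated in full; the proofs are below) =====
def Claim_equal_all_one_swaps_tuple : Prop := ∀ (matrix : List (List Int)), Dom_all_one_swaps_tuple matrix → Pre_all_one_swaps_tuple matrix → Spec_all_one_swaps_tuple matrix (all_one_swaps_tuple matrix)

-- ===== LEMMAS AND PROOFS =====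

-- flat offset of the start of row i
def pvOff (matrix : List (List Int)) (i : Nat) : Nat :=
  ((matrix.take i).map List.length).sum

-- the pairs A's track set holds when the scan reaches cell (i, j) (row-major)
def pvTrackP (m n i j : Int) (p : (Int × Int) × (Int × Int)) : Prop :=
  0 ≤ p.1.1 ∧ p.1.1 < m ∧ 0 ≤ p.1.2 ∧ p.1.2 < n ∧
  (p.1.1 < i ∨ (p.1.1 = i ∧ p.1.2 < j)) ∧
  ((p.2.1 = p.1.1 + 1 ∧ p.2.2 = p.1.2 ∧ p.1.1 + 1 ≤ m - 1) ∨
   (p.2.1 = p.1.1 ∧ p.2.2 = p.1.2 + 1 ∧ p.1.2 + 1 ≤ n - 1))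

-- what A emits at cell (i, j)
def pvCellOutA (matrix : List (List Int)) (i j : Int) : List (List Int) :=
  (if i + 1 ≤ (matrix.length : Int) - 1 then [pvFlatten (pvSwap matrix (i + 1) j i j)] else []) ++
  (if j + 1 ≤ (((PySem.List.pyGet? matrix 0).getD []).length : Int) - 1 then
      [pvFlatten (pvSwap matrix i (j + 1) i j)] else [])

def pvN (M : List (List Int)) : Nat := ((PySem.List.pyGet? M 0).getD []).length

lemma sw_down (M : List (List Int)) (i j : Int) (hi : 0 ≤ i ∧ i < (M.length : Int))
    (hj : 0 ≤ j ∧ j < (pvN M : Int)) :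
    pvSwappable M (i, j) (i + 1, j) = decide (i + 1 ≤ (M.length : Int) - 1) := by
  simp only [pvSwappable, pvN] at *
  split_ifs with h1 h2 <;> simp_all <;> omega

lemma sw_up (M : List (List Int)) (i j : Int) (hi : 0 ≤ i ∧ i < (M.length : Int))
    (hj : 0 ≤ j ∧ j < (pvN M : Int)) :
    pvSwappable M (i, j) (i + -1, j) = decide (1 ≤ i) := by
  simp only [pvSwappable, pvN] at *
  split_ifs with h1 h2 <;> simp_all <;> omega

lemma sw_right (M : List (List Int)) (i j : Int) (hi : 0 ≤ i ∧ i < (M.length : Int))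
    (hj : 0 ≤ j ∧ j < (pvN M : Int)) :
    pvSwappable M (i, j) (i, j + 1) = decide (j + 1 ≤ (pvN M : Int) - 1) := by
  simp only [pvSwappable, pvN] at *
  split_ifs with h1 h2 <;> simp_all <;> omega

lemma sw_left (M : List (List Int)) (i j : Int) (hi : 0 ≤ i ∧ i < (M.length : Int))
    (hj : 0 ≤ j ∧ j < (pvN M : Int)) :
    pvSwappable M (i, j) (i, j + -1) = decide (1 ≤ j) := by
  simp only [pvSwappable, pvN] at *
  split_ifs with h1 h2 <;> simp_all <;> omega
lemma trackP_succ_iff (m n i j : Int) (hi : 0 ≤ i ∧ i < m) (hj : 0 ≤ j ∧ j < n)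
    (p : (Int × Int) × (Int × Int)) :
    pvTrackP m n i (j + 1) p ↔ pvTrackP m n i j p ∨
      (p = ((i, j), (i + 1, j)) ∧ i + 1 ≤ m - 1) ∨ (p = ((i, j), (i, j + 1)) ∧ j + 1 ≤ n - 1) := by
  obtain ⟨⟨a, b⟩, ⟨c, d⟩⟩ := p
  simp only [pvTrackP, Prod.mk.injEq]
  omega

lemma pvCellOutA_eq (M : List (List Int)) (i j : Int) :
    pvCellOutA M i j =
      (if i + 1 ≤ (M.length : Int) - 1 then [pvFlatten (pvSwap M (i + 1) j i j)] else []) ++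
      (if j + 1 ≤ (pvN M : Int) - 1 then [pvFlatten (pvSwap M i (j + 1) i j)] else []) := rfl

lemma stepK_one_eq (M : List (List Int)) (i j : Int)
    (hi : 0 ≤ i ∧ i < (M.length : Int)) (hj : 0 ≤ j ∧ j < (pvN M : Int))
    (track : PySem.Set ((Int × Int) × (Int × Int))) (acc : List (List Int))
    (hinv : ∀ p, p ∈ track ↔ pvTrackP (M.length : Int) (pvN M : Int) i j p) :
    pvStepK M i j (track, acc) 1 =
      (track ++ (if i + 1 ≤ (M.length : Int) - 1 then [((i, j), (i + 1, j))] else [])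
             ++ (if j + 1 ≤ (pvN M : Int) - 1 then [((i, j), (i, j + 1))] else []),
       acc ++ pvCellOutA M i j) := by
  have hF1 : ((i, j), (i + 1, j)) ∉ track := by
    rw [hinv]; simp [pvTrackP]; try omega
  have hF2 : ((i + 1, j), (i, j)) ∉ track := by
    rw [hinv]; simp [pvTrackP]; try omega
  have hF3 : ((i, j), (i, j + 1)) ∉ track := by
    rw [hinv]; simp [pvTrackP]; try omega
  have hF4 : ((i, j + 1), (i, j)) ∉ track := by
    rw [hinv]; simp [pvTrackP]; try omega
  simp only [pvStepK, sw_down M i j hi hj, sw_right M i j hi hj]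
  by_cases hD : i + 1 ≤ (M.length : Int) - 1 <;>
    by_cases hR : j + 1 ≤ (pvN M : Int) - 1 <;>
      (try have hD' : i + 1 < (M.length : Int) := by omega) <;>
      (try have hR' : j + 1 < (pvN M : Int) := by omega) <;>
      (try have hDn : ¬ i + 1 < (M.length : Int) := by omega) <;>
      (try have hRn : ¬ j + 1 < (pvN M : Int) := by omega) <;>
      simp only [pvCellOutA_eq] <;>
      simp_all [PySem.Set.add_of_not_mem, List.mem_append] <;>
      split_ifs <;> simp_all <;> omega
lemma stepK_negone_eq (M : List (List Int)) (i j : Int)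
    (hi : 0 ≤ i ∧ i < (M.length : Int)) (hj : 0 ≤ j ∧ j < (pvN M : Int))
    (st : PySem.Set ((Int × Int) × (Int × Int)) × List (List Int))
    (hUp : 1 ≤ i → ((i + -1, j), (i, j)) ∈ st.1)
    (hLeft : 1 ≤ j → ((i, j + -1), (i, j)) ∈ st.1) :
    pvStepK M i j st (-1) = st := by
  simp only [pvStepK, sw_up M i j hi hj, sw_left M i j hi hj]
  by_cases hI : 1 ≤ i <;> by_cases hJ : 1 ≤ j
  · simp [hI, hJ, hUp hI, hLeft hJ]
  · simp [hI, hJ, hUp hI]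
  · simp [hI, hJ, hLeft hJ]
  · simp [hI, hJ]
lemma cellA_step (M : List (List Int)) (i j : Int)
    (hi : 0 ≤ i ∧ i < (M.length : Int)) (hj : 0 ≤ j ∧ j < (pvN M : Int))
    (st : PySem.Set ((Int × Int) × (Int × Int)) × List (List Int))
    (hinv : ∀ p, p ∈ st.1 ↔ pvTrackP (M.length : Int) (pvN M : Int) i j p) :
    (pvCellA M i st j).2 = st.2 ++ pvCellOutA M i j ∧
    ∀ p, p ∈ (pvCellA M i st j).1 ↔ pvTrackP (M.length : Int) (pvN M : Int) i (j + 1) p := by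
  obtain ⟨track, acc⟩ := st
  simp only [pvCellA, List.foldl_cons, List.foldl_nil]
  rw [stepK_one_eq M i j hi hj track acc hinv]
  set tr' := track ++ (if i + 1 ≤ (M.length : Int) - 1 then [((i, j), (i + 1, j))] else [])
      ++ (if j + 1 ≤ (pvN M : Int) - 1 then [((i, j), (i, j + 1))] else []) with htr'
  have hmem : ∀ p, p ∈ tr' ↔ (pvTrackP (M.length : Int) (pvN M : Int) i j p ∨
      (p = ((i, j), (i + 1, j)) ∧ i + 1 ≤ (M.length : Int) - 1) ∨
      (p = ((i, j), (i, j + 1)) ∧ j + 1 ≤ (pvN M : Int) - 1)) := by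
    intro p
    rw [htr']
    by_cases hD : i + 1 ≤ (M.length : Int) - 1 <;>
      by_cases hR : j + 1 ≤ (pvN M : Int) - 1 <;>
        simp [hD, hR, List.mem_append, hinv p] <;> tauto
  have hup : 1 ≤ i → ((i + -1, j), (i, j)) ∈ tr' := by
    intro h1
    rw [hmem]
    left
    simp only [pvTrackP]
    simp
    omega
  have hleft : 1 ≤ j → ((i, j + -1), (i, j)) ∈ tr' := by
    intro h1
    rw [hmem]
    left
    simp only [pvTrackP]
    simp
    omega
  rw [stepK_negone_eq M i j hi hj _ hup hleft]
  refine ⟨rfl, ?_⟩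
  intro p
  rw [hmem, trackP_succ_iff _ _ _ _ hi hj]
lemma trackP_row_iff (m n i : Int) (p : (Int × Int) × (Int × Int)) :
    pvTrackP m n i n p ↔ pvTrackP m n (i + 1) 0 p := by
  obtain ⟨⟨a, b⟩, ⟨c, d⟩⟩ := p
  simp only [pvTrackP]
  omega

lemma colA (M : List (List Int)) (i : Int) (hi : 0 ≤ i ∧ i < (M.length : Int)) :
    ∀ (cnt : Nat) (j0 : Int)
      (st : PySem.Set ((Int × Int) × (Int × Int)) × List (List Int)),
      j0 + cnt = (pvN M : Int) → 0 ≤ j0 →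
      (∀ p, p ∈ st.1 ↔ pvTrackP (M.length : Int) (pvN M : Int) i j0 p) →
      ((PySem.List.pyRange j0 (pvN M : Int) 1).foldl (pvCellA M i) st).2
          = st.2 ++ (PySem.List.pyRange j0 (pvN M : Int) 1).flatMap (pvCellOutA M i) ∧
      ∀ p, p ∈ ((PySem.List.pyRange j0 (pvN M : Int) 1).foldl (pvCellA M i) st).1 ↔
        pvTrackP (M.length : Int) (pvN M : Int) i (pvN M : Int) p := by
  intro cnt
  induction cnt with
  | zero =>
    intro j0 st h0 hge hinv
    rw [PySem.List.pyRange_one_eq_nil (by omega)]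
    refine ⟨by simp, by simpa [show j0 = (pvN M : Int) by omega] using hinv⟩
  | succ cnt ih =>
    intro j0 st h0 hge hinv
    rw [PySem.List.pyRange_one_cons (a := j0) (b := (pvN M : Int)) (by omega)]
    simp only [List.foldl_cons, List.flatMap_cons]
    obtain ⟨h1, h2⟩ := cellA_step M i j0 hi ⟨hge, by omega⟩ st hinv
    obtain ⟨h3, h4⟩ := ih (j0 + 1) (pvCellA M i st j0) (by omega) (by omega) h2
    refine ⟨?_, h4⟩
    rw [h3, h1, List.append_assoc]

lemma rowA (M : List (List Int)) :
    ∀ (cnt : Nat) (i0 : Int)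
      (st : PySem.Set ((Int × Int) × (Int × Int)) × List (List Int)),
      i0 + cnt = (M.length : Int) → 0 ≤ i0 →
      (∀ p, p ∈ st.1 ↔ pvTrackP (M.length : Int) (pvN M : Int) i0 0 p) →
      ((PySem.List.pyRange i0 (M.length : Int) 1).foldl
          (fun st i => (PySem.List.pyRange 0 (pvN M : Int) 1).foldl (pvCellA M i) st) st).2
        = st.2 ++ (PySem.List.pyRange i0 (M.length : Int) 1).flatMap
            (fun i => (PySem.List.pyRange 0 (pvN M : Int) 1).flatMap (pvCellOutA M i)) := by
  intro cnt
  induction cnt with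
  | zero =>
    intro i0 st h0 hge hinv
    rw [PySem.List.pyRange_one_eq_nil (a := i0) (b := (M.length : Int)) (by omega)]
    simp
  | succ cnt ih =>
    intro i0 st h0 hge hinv
    rw [PySem.List.pyRange_one_cons (a := i0) (b := (M.length : Int)) (by omega)]
    simp only [List.foldl_cons, List.flatMap_cons]
    obtain ⟨h1, h2⟩ := colA M i0 ⟨hge, by omega⟩ (pvN M) 0 st (by omega) (by omega) hinv
    have h2' : ∀ p, p ∈ ((PySem.List.pyRange 0 (pvN M : Int) 1).foldl (pvCellA M i0) st).1 ↔
        pvTrackP (M.length : Int) (pvN M : Int) (i0 + 1) 0 p := by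
      intro p; rw [h2 p, trackP_row_iff]
    rw [ih (i0 + 1) _ (by omega) (by omega) h2', h1, List.append_assoc]

lemma a_char (M : List (List Int)) :
    all_one_swaps_tuple M = (PySem.List.pyRange 0 (M.length : Int) 1).flatMap
      (fun i => (PySem.List.pyRange 0 (pvN M : Int) 1).flatMap (pvCellOutA M i)) := by
  have hinit : ∀ p, p ∈ (PySem.Set.empty : PySem.Set ((Int × Int) × (Int × Int))) ↔
      pvTrackP (M.length : Int) (pvN M : Int) 0 0 p := by
    intro p
    obtain ⟨⟨a, b⟩, ⟨c, d⟩⟩ := p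
    simp only [pvTrackP, PySem.Set.empty]
    simp
    omega
  have := rowA M M.length 0 (PySem.Set.empty, []) (by omega) (by omega) hinit
  simpa [all_one_swaps_tuple, pvN] using this
lemma pvOff_zero (M : List (List Int)) : pvOff M 0 = 0 := rfl
lemma pvOff_cons (r : List Int) (rs : List (List Int)) (i : Nat) :
    pvOff (r :: rs) (i + 1) = r.length + pvOff rs i := by
  simp [pvOff]

lemma flatten_getD (M : List (List Int)) : ∀ (i j : Nat), i < M.length →
    j < (M.getD i []).length →
    M.flatten.getD (pvOff M i + j) 0 = (M.getD i []).getD j 0 := by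
  induction M with
  | nil => intro i j h; simp at h
  | cons r rs ih =>
    intro i j hi hj
    cases i with
    | zero =>
      simp only [pvOff_zero, Nat.zero_add, List.getD] at *
      simp only [List.flatten_cons]
      rw [List.getElem?_append_left (by simpa using hj)]
      rfl
    | succ i =>
      simp only [List.getD_cons_succ] at hj ⊢
      rw [List.flatten_cons, pvOff_cons, List.getD]
      rw [Nat.add_assoc, List.getElem?_append_right (by omega)]
      simp only [Nat.add_sub_cancel_left]
      exact ih i j (by simpa using hi) hj

lemma flatten_set (M : List (List Int)) : ∀ (i j : Nat) (v : Int), i < M.length →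
    j < (M.getD i []).length →
    (M.set i ((M.getD i []).set j v)).flatten = M.flatten.set (pvOff M i + j) v := by
  induction M with
  | nil => intro i j v h; simp at h
  | cons r rs ih =>
    intro i j v hi hj
    cases i with
    | zero =>
      simp only [List.getD_cons_zero, List.set_cons_zero, List.flatten_cons, pvOff_zero, Nat.zero_add]
      rw [List.set_append_left _ _ (by simpa using hj)]
    | succ i =>
      simp only [List.getD_cons_succ] at hj ⊢
      rw [List.set_cons_succ, List.flatten_cons, List.flatten_cons, pvOff_cons, Nat.add_assoc,
        List.set_append_right _ _ (by omega)]
      congr 1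
      rw [Nat.add_sub_cancel_left]
      exact ih i j v (by simpa using hi) hj

lemma len_getD_set (M : List (List Int)) (i k : Nat) (r' : List Int)
    (hlen : r'.length = (M.getD i []).length) :
    ((M.set i r').getD k []).length = (M.getD k []).length := by
  by_cases h : i = k
  · subst h
    by_cases hi : i < M.length
    · simp [List.getD, List.getElem?_set_self, hi, hlen]
    · rw [List.set_eq_of_length_le (by omega)]
  · simp [List.getD, List.getElem?_set_ne h]

lemma pvOff_set (M : List (List Int)) (i : Nat) (r' : List Int)
    (hlen : r'.length = (M.getD i []).length) (k : Nat) :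
    pvOff (M.set i r') k = pvOff M k := by
  induction M generalizing i k with
  | nil => simp
  | cons r rs ih =>
    cases i with
    | zero =>
      cases k with
      | zero => rfl
      | succ k => simp only [List.set_cons_zero, pvOff_cons, List.getD_cons_zero] at *; omega
    | succ i =>
      cases k with
      | zero => rfl
      | succ k =>
        simp only [List.set_cons_succ, pvOff_cons, List.getD_cons_succ] at *
        rw [ih i hlen k]

lemma pvGet_natCast (M : List (List Int)) (i j : Nat) :
    pvGet M (i : Int) (j : Int) = (M.getD i []).getD j 0 := by
  simp [pvGet, PySem.List.pyGet?_natCast, List.getD]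

lemma pvSet_natCast (M : List (List Int)) (i j : Nat) (v : Int) :
    pvSet M (i : Int) (j : Int) v = M.set i ((M.getD i []).set j v) := by
  simp [pvSet, PySem.List.pyGet?_natCast, List.getD]

-- B fold
lemma b_fold (M : List (List Int)) : ∀ (fl : List Int) (ofs : List Nat),
    M.foldl (fun (fo : List Int × List Nat) row => (fo.1 ++ row, fo.2 ++ [fo.1.length])) (fl, ofs)
      = (fl ++ M.flatten, ofs ++ (List.range M.length).map (fun i => fl.length + ((M.take i).map List.length).sum)) := by
  induction M with
  | nil => intro fl ofs; simp
  | cons r rs ih =>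
    intro fl ofs
    simp only [List.foldl_cons, ih]
    refine Prod.ext (by simp) ?_
    simp only [List.length_cons, List.range_succ_eq_map, List.map_cons, List.map_map,
      List.take_zero, List.map_nil, List.sum_nil, Nat.add_zero, List.flatten_cons]
    rw [List.append_assoc]
    congr 1
    rw [List.singleton_append]
    congr 1
    apply List.map_congr_left
    intro k _
    simp [List.take_succ_cons, Nat.add_assoc, Function.comp]
lemma swap_flat (M : List (List Int)) (a b c d : Nat)
    (ha : a < M.length) (hb : b < (M.getD a []).length)
    (hc : c < M.length) (hd : d < (M.getD c []).length) :
    pvFlatten (pvSwap M (a : Int) (b : Int) (c : Int) (d : Int))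
      = pvFlatSwap M.flatten (pvOff M a + b) (pvOff M c + d) := by
  have hfl : ∀ (N : List (List Int)), pvFlatten N = N.flatten := by
    intro N
    rw [pvFlatten, PySem.List.foldl_append_eq_flatMap]
    simp [List.flatMap_id]
  rw [pvSwap]
  simp only [pvSet_natCast, pvGet_natCast]
  rw [hfl]
  rw [flatten_set _ c d _ (by simpa using hc)
    (by rw [len_getD_set M a c _ (by simp)]; exact hd)]
  rw [flatten_set _ a b _ ha hb]
  rw [pvOff_set _ a _ (by simp) c]
  rw [pvFlatSwap]
  rw [← flatten_getD M a b ha hb, ← flatten_getD M c d hc hd]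
lemma pvFlatSwap_comm (flat : List Int) (p q : Nat) (h : p ≠ q) :
    pvFlatSwap flat p q = pvFlatSwap flat q p := by
  rw [pvFlatSwap, pvFlatSwap, List.set_comm _ _ h]

def pvCellB (M : List (List Int)) (i j : Nat) : List (List Int) :=
  (if i + 1 < M.length then
      [pvFlatSwap M.flatten (pvOff M i + j) (pvOff M (i + 1) + j)] else []) ++
  (if j + 1 < pvN M then
      [pvFlatSwap M.flatten (pvOff M i + j) (pvOff M i + j + 1)] else [])

lemma pvN_match (M : List (List Int)) :
    (match M with | [] => 0 | r :: _ => r.length) = pvN M := by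
  cases M <;> simp [pvN, PySem.List.pyGet?, PySem.List.pyIdx?]

lemma b_char (M : List (List Int)) :
    all_one_swaps_tuple_alt M
      = (List.range M.length).flatMap (fun i => (List.range (pvN M)).flatMap (pvCellB M i)) := by
  unfold all_one_swaps_tuple_alt
  simp only [b_fold M [] [], List.nil_append, List.length_nil, Nat.zero_add, pvN_match]
  have hoff : ∀ k, k < M.length →
      ((List.range M.length).map (fun i => ((M.take i).map List.length).sum)).getD k 0
        = pvOff M k := by
    intro k hk
    rw [PySem.List.getD_map_range _ _ _ _ hk]
    rfl
  have hinner : ∀ i, i < M.length → ∀ (res : List (List Int)),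
      (List.range (pvN M)).foldl (fun res j =>
        let res := if i + 1 < M.length then
            res ++ [pvFlatSwap M.flatten
              ((((List.range M.length).map (fun i => ((M.take i).map List.length).sum)).getD i 0) + j)
              ((((List.range M.length).map (fun i => ((M.take i).map List.length).sum)).getD (i + 1) 0) + j)]
          else res
        if j + 1 < pvN M then
          res ++ [pvFlatSwap M.flatten
            ((((List.range M.length).map (fun i => ((M.take i).map List.length).sum)).getD i 0) + j)
            ((((List.range M.length).map (fun i => ((M.take i).map List.length).sum)).getD i 0) + j + 1)]
        else res) res
      = res ++ (List.range (pvN M)).flatMap (pvCellB M i) := by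
    intro i hii res
    rw [PySem.List.foldl_congr_mem _ _ (fun acc j => acc ++ pvCellB M i j) res ?_]
    · rw [PySem.List.foldl_append_eq_flatMap]
    · intro acc j _
      by_cases hd : i + 1 < M.length <;> by_cases hr : j + 1 < pvN M
      · simp only [hd, hr, if_true, ite_true]
        rw [hoff i hii, hoff (i + 1) hd]
        simp [pvCellB, hd, hr, List.append_assoc]
      · simp only [hd, hr, if_true, if_false, ite_true, ite_false]
        rw [hoff i hii, hoff (i + 1) hd]
        simp [pvCellB, hd, hr]
      · simp only [hd, hr, if_true, if_false, ite_true, ite_false]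
        rw [hoff i hii]
        simp [pvCellB, hd, hr]
      · simp only [hd, hr, if_false, ite_false]
        simp [pvCellB, hd, hr]
  rw [PySem.List.foldl_congr_mem _ _
      (fun (res : List (List Int)) i => res ++ (List.range (pvN M)).flatMap (pvCellB M i)) [] ?_]
  · rw [PySem.List.foldl_append_eq_flatMap]
    simp
  · intro acc i hmem
    exact hinner i (List.mem_range.mp hmem) acc
lemma pvN_le_row (M : List (List Int)) (hpre : ∀ r ∈ M, (M.headD []).length ≤ r.length)
    (k : Nat) (hk : k < M.length) : pvN M ≤ (M.getD k []).length := by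
  have h1 : pvN M = (M.headD []).length := by
    cases M <;> simp [pvN, PySem.List.pyGet?, PySem.List.pyIdx?]
  rw [h1, List.getD_eq_getElem _ _ hk]
  exact hpre _ (List.getElem_mem hk)

lemma pvOff_succ (M : List (List Int)) : ∀ (i : Nat), i < M.length →
    pvOff M (i + 1) = pvOff M i + (M.getD i []).length := by
  induction M with
  | nil => simp
  | cons r rs ih =>
    intro i hi
    cases i with
    | zero => simp [pvOff_cons, pvOff]
    | succ i =>
      rw [pvOff_cons, pvOff_cons, List.getD_cons_succ, ih i (by simpa using hi)]
      omega

lemma cell_link (M : List (List Int)) (hpre : ∀ r ∈ M, (M.headD []).length ≤ r.length)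
    (i j : Nat) (hi : i < M.length) (hj : j < pvN M) :
    pvCellOutA M (i : Int) (j : Int) = pvCellB M i j := by
  have hrow := pvN_le_row M hpre
  have hoffs : pvOff M i + j < pvOff M (i + 1) := by
    rw [pvOff_succ M i hi]
    have := hrow i hi
    omega
  rw [pvCellOutA_eq, pvCellB]
  congr 1
  · by_cases hd : i + 1 < M.length
    · rw [if_pos (by push_cast; omega), if_pos hd]
      have : ((i : Int) + 1) = ((i + 1 : Nat) : Int) := by push_cast; ring
      rw [this, swap_flat M (i + 1) j i j hd (by have := hrow (i + 1) hd; omega) hi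
          (by have := hrow i hi; omega)]
      rw [pvFlatSwap_comm _ _ _ (by omega)]
    · rw [if_neg (by push_cast; omega), if_neg hd]
  · by_cases hr : j + 1 < pvN M
    · rw [if_pos (by push_cast; omega), if_pos hr]
      have : ((j : Int) + 1) = ((j + 1 : Nat) : Int) := by push_cast; ring
      rw [this, swap_flat M i (j + 1) i j hi (by have := hrow i hi; omega) hi
          (by have := hrow i hi; omega)]
      rw [pvFlatSwap_comm _ _ _ (by omega), Nat.add_assoc]
    · rw [if_neg (by push_cast; omega), if_neg hr]

lemma main_eq (M : List (List Int)) (hpre : ∀ r ∈ M, (M.headD []).length ≤ r.length) :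
    all_one_swaps_tuple M = all_one_swaps_tuple_alt M := by
  rw [a_char, b_char, PySem.List.pyRange_zero_nat, PySem.List.pyRange_zero_nat]
  simp only [List.flatMap_map]
  apply List.flatMap_congr
  intro i hi
  apply List.flatMap_congr
  intro j hj
  exact cell_link M hpre i j (List.mem_range.mp hi) (List.mem_range.mp hj)

-- ===== VERDICT (by name: the statement is the Claim_ definition above) =====
theorem all_one_swaps_tuple_spec : Claim_equal_all_one_swaps_tuple := by
  intro M _ hpre
  exact main_eq M hpre
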